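-- pv_equiv track=rewrite | github.com/timcode-cmyk/Subtitled-video-Pro | room_edit.py | _tokenize_user_text_for_alignment
-- ===== SOURCE A (Python) =====
-- def _tokenize_user_text_for_alignment(raw_text):
--     raw_text = (raw_text or "").replace("\r\n", "\n").replace("\r", "\n")
--     tokens = []
--     for line_idx, line in enumerate(raw_text.split("\n")):
--         line = line.strip()
--         if not line: continue
--         parts = line.split()
--         if not parts: continue
--         if tokens and line_idx > 0:
--             parts[0] = "\n" + parts[0].lstrip()
--         tokens.extend(parts)
--     return tokens
-- ===== SOURCE B (Python) =====
-- def _tokenize_user_text_for_alignment(raw_text):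
--     # Single character-level scan (finite-state machine): no split()/strip() passes.
--     text = (raw_text or "").replace("\r\n", "\n").replace("\r", "\n")
--     tokens = []
--     cur = []
--     pending = False  # set when a newline occurs after the most recent emitted word
--     for ch in text:
--         if ch.isspace():
--             if cur:
--                 word = "".join(cur)
--                 tokens.append(("\n" + word) if (pending and tokens) else word)
--                 cur = []
--                 pending = False
--             if ch == "\n":
--                 pending = True
--         else:
--             cur.append(ch)
--     if cur:
--         word = "".join(cur)
--         tokens.append(("\n" + word) if (pending and tokens) else word)
--     return tokens
-- ===== Notes on version B (the rewrite author's own statement) =====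
-- stated objective: alternative
-- what changed: Replaces A's two-level decomposition (split text into lines, strip/skip blank lines, split each line into words, mark via the raw line index and tokens state) by a single character-level finite-state scan that builds each token from characters directly and decides the newline marker with a boolean flag tracking whether a newline occurred after the most recent emitted word; no split()/strip() calls at all.
import Mathlib
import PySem

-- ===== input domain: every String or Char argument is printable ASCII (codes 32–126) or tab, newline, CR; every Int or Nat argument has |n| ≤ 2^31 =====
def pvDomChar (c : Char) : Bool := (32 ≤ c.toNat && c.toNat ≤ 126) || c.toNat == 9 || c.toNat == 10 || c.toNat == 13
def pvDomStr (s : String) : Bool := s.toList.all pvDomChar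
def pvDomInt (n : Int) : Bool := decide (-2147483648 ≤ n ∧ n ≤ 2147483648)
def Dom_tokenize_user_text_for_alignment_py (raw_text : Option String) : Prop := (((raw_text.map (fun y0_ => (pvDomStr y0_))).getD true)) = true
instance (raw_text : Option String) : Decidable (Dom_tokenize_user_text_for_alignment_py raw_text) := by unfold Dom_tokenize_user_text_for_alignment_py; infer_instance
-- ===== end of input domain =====

-- B replaces A's line-splitting loop (split into lines, strip, split each line into words,
-- mark via raw line index and tokens state) by a single character-level finite-state scan
-- that builds tokens from characters directly; objective: alternative. A is total, so no Pre_.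

-- ===== PORT A =====
-- the for-loop over enumerate(raw_text.split("\n")): line_idx carried explicitly
def pvTokALoop (lines : List String) (line_idx : Nat) (tokens : List String) : List String :=
  match lines with
  | [] => tokens
  | line :: rest =>
      let line := PySem.Str.strip line
      if line = "" then pvTokALoop rest (line_idx + 1) tokens
      else
        let parts := PySem.Str.split₀ line
        if parts = [] then pvTokALoop rest (line_idx + 1) tokens
        else
          let parts := if tokens ≠ [] ∧ 0 < line_idx then
              match parts with
              | p :: ps => ("\n" ++ PySem.Str.lstrip p) :: ps
              | [] => []
            else parts
          pvTokALoop rest (line_idx + 1) (tokens ++ parts)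

def tokenize_user_text_for_alignment_py (raw_text : Option String) : List String :=
  let t := PySem.Str.replace (PySem.Str.replace (raw_text.getD "") "\r\n" "\n") "\r" "\n"
  -- split("\n"): separator is non-empty, so Str.split? is always `some`
  pvTokALoop ((PySem.Str.split? t "\n").getD []) 0 []

-- ===== PORT B =====
-- the for-loop over the characters of text: state = (tokens, cur, pending)
def pvScanB (cs : List Char) (tokens : List String) (cur : List Char) (pending : Bool) : List String :=
  match cs with
  | [] =>
      -- trailing 'if cur: tokens.append(...)'
      if cur.isEmpty then tokens
      else tokens ++ [if pending && !tokens.isEmpty then "\n" ++ String.ofList cur else String.ofList cur]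
  | c :: rest =>
      if PySem.Chars.isspace c then
        if cur.isEmpty then
          pvScanB rest tokens [] (if c = '\n' then true else pending)
        else
          pvScanB rest
            (tokens ++ [if pending && !tokens.isEmpty then "\n" ++ String.ofList cur else String.ofList cur])
            [] (if c = '\n' then true else false)
      else pvScanB rest tokens (cur ++ [c]) pending

def tokenize_user_text_for_alignment_py_alt (raw_text : Option String) : List String :=
  let text := PySem.Str.replace (PySem.Str.replace (raw_text.getD "") "\r\n" "\n") "\r" "\n"
  pvScanB text.toList [] [] false

-- ===== PRECONDITION & SPEC =====
def Spec_tokenize_user_text_for_alignment_py (raw_text : Option String) (out : List String) : Prop := out = tokenize_user_text_for_alignment_py_alt raw_text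
instance (raw_text : Option String) (out : List String) : Decidable (Spec_tokenize_user_text_for_alignment_py raw_text out) := by unfold Spec_tokenize_user_text_for_alignment_py; infer_instance

-- ===== CLAIM (what is proved, stated in full; the proofs are below) =====
def Claim_equal_tokenize_user_text_for_alignment_py : Prop := ∀ (raw_text : Option String), Dom_tokenize_user_text_for_alignment_py raw_text → Spec_tokenize_user_text_for_alignment_py raw_text (tokenize_user_text_for_alignment_py raw_text)

-- ===== LEMMAS AND PROOFS =====

-- canonical middle form both ports are reduced to
def pvMark (words : List String) : List String :=
  match words with
  | w :: ws => ("\n" ++ w) :: ws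
  | [] => []

def pvMarkIf (b : Bool) (ws : List String) : List String := if b then pvMark ws else ws

def pvWordsC (p : List Char) : List String := (PySem.Chars.split₀ p).map String.ofList

def pvContentC (pieces : List (List Char)) : List (List String) :=
  (pieces.map pvWordsC).filter (fun w => !w.isEmpty)

def pvCanon (pieces : List (List Char)) : List String :=
  match pvContentC pieces with
  | [] => []
  | head :: rest => head ++ rest.flatMap pvMark

def pvContent (ls : List String) : List (List String) :=
  (ls.map PySem.Str.split₀).filter (fun w => !w.isEmpty)

-- splitting at '\n', structurally
def pvSplitNl : List Char → List (List Char)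
  | [] => [[]]
  | c :: rest => if c = '\n' then [] :: pvSplitNl rest
                 else (pvSplitNl rest).modifyHead (fun p => c :: p)

theorem pvMarkIf_nil (b : Bool) : pvMarkIf b [] = [] := by
  cases b <;> rfl

theorem pvMarkIf_cons (b : Bool) (w : String) (ws : List String) :
    pvMarkIf b (w :: ws) = (if b then "\n" ++ w else w) :: ws := by
  cases b <;> rfl

theorem pv_intercalate_cons₂ (x y : List Char) (zs : List (List Char)) :
    List.intercalate ['\n'] (x :: y :: zs) = x ++ '\n' :: List.intercalate ['\n'] (y :: zs) := by
  simp [List.intercalate, List.intersperse_cons₂]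

theorem pv_intercalate_single (x : List Char) :
    List.intercalate ['\n'] [x] = x := by
  simp [List.intercalate]

-- ---- Chars-level facts about split₀ / strip / lstrip ----

theorem pv_goAllSpace (w : List Char) (hw : ∀ c ∈ w, PySem.Chars.isspace c = true) :
    ∀ (cur : List Char) (acc : List (List Char)),
      PySem.Chars.split₀.go w cur acc = PySem.Chars.split₀.go [] cur acc := by
  induction w with
  | nil => intro cur acc; rfl
  | cons c w ih =>
      intro cur acc
      have hc : PySem.Chars.isspace c = true := hw c (by simp)
      have hw' : ∀ c ∈ w, PySem.Chars.isspace c = true := fun d hd => hw d (by simp [hd])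
      simp only [PySem.Chars.split₀.go, hc, if_true]
      by_cases hcur : cur.isEmpty
      · simp only [hcur, if_true]
        rw [ih hw' [] acc]
        simp [PySem.Chars.split₀.go, List.isEmpty_iff.mp hcur]
      · simp only [hcur]
        rw [ih hw' [] (cur.reverse :: acc)]
        simp [PySem.Chars.split₀.go, hcur]

theorem pv_goAppendSpace (t w : List Char) (hw : ∀ c ∈ w, PySem.Chars.isspace c = true) :
    ∀ (cur : List Char) (acc : List (List Char)),
      PySem.Chars.split₀.go (t ++ w) cur acc = PySem.Chars.split₀.go t cur acc := by
  induction t with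
  | nil => intro cur acc; simpa using pv_goAllSpace w hw cur acc
  | cons c t ih =>
      intro cur acc
      by_cases hc : PySem.Chars.isspace c
      · by_cases hcur : cur.isEmpty
        · simp only [List.cons_append, PySem.Chars.split₀.go, hc, hcur, if_true]
          exact ih _ _
        · simp only [List.cons_append, PySem.Chars.split₀.go, hc, hcur, if_true]
          simp only [Bool.false_eq_true, if_false]
          exact ih _ _
      · simp only [List.cons_append, PySem.Chars.split₀.go, hc]
        simp only [Bool.false_eq_true, if_false]
        exact ih _ _

theorem pv_goDropWhile (s : List Char) :
    ∀ (acc : List (List Char)),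
      PySem.Chars.split₀.go (List.dropWhile PySem.Chars.isspace s) [] acc =
      PySem.Chars.split₀.go s [] acc := by
  induction s with
  | nil => intro acc; rfl
  | cons c s ih =>
      intro acc
      by_cases hc : PySem.Chars.isspace c
      · rw [List.dropWhile_cons_of_pos hc]
        rw [ih acc]
        simp [PySem.Chars.split₀.go, hc]
      · rw [List.dropWhile_cons_of_neg (by simpa using hc)]

theorem pv_goNeNil (s : List Char) :
    ∀ (cur : List Char) (acc : List (List Char)), cur ≠ [] ∨ acc ≠ [] →
      PySem.Chars.split₀.go s cur acc ≠ [] := by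
  induction s with
  | nil =>
      intro cur acc h
      simp only [PySem.Chars.split₀.go]
      by_cases hcur : cur.isEmpty
      · have : cur = [] := List.isEmpty_iff.mp hcur
        simp only [hcur, if_true]
        rcases h with h | h
        · exact absurd this h
        · simpa using h
      · simp [hcur]
  | cons c s ih =>
      intro cur acc h
      simp only [PySem.Chars.split₀.go]
      by_cases hc : PySem.Chars.isspace c
      · simp only [hc, if_true]
        by_cases hcur : cur.isEmpty
        · have hcur' : cur = [] := List.isEmpty_iff.mp hcur
          simp only [hcur, if_true]
          exact ih [] acc (Or.inr (h.resolve_left (by simp [hcur'])))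
        · simp only [hcur, Bool.false_eq_true, if_false]
          exact ih [] (cur.reverse :: acc) (Or.inr (by simp))
      · simp only [hc, Bool.false_eq_true, if_false]
        exact ih (c :: cur) acc (Or.inl (by simp))

theorem pv_dropWhile_head_false {p : Char → Bool} {l : List Char} {c : Char} {rest : List Char}
    (h : List.dropWhile p l = c :: rest) : p c = false := by
  induction l with
  | nil => simp at h
  | cons a t ih =>
      by_cases ha : p a
      · rw [List.dropWhile_cons_of_pos ha] at h; exact ih h
      · rw [List.dropWhile_cons_of_neg (by simpa using ha)] at h
        rw [List.cons.injEq] at h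
        rw [← h.1]; simpa using ha

theorem pv_split₀_eq_nil_iff (s : List Char) :
    PySem.Chars.split₀ s = [] ↔ ∀ c ∈ s, PySem.Chars.isspace c = true := by
  constructor
  · intro h
    by_contra hall
    push_neg at hall
    have hd : List.dropWhile PySem.Chars.isspace s ≠ [] := by
      intro hnil
      rw [List.dropWhile_eq_nil_iff] at hnil
      obtain ⟨c, hc, hcs⟩ := hall
      exact hcs (hnil c hc)
    unfold PySem.Chars.split₀ at h
    rw [← pv_goDropWhile s []] at h
    rcases hcons : List.dropWhile PySem.Chars.isspace s with _ | ⟨c, rest⟩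
    · exact hd hcons
    · have hc : PySem.Chars.isspace c = false := pv_dropWhile_head_false hcons
      rw [hcons] at h
      simp only [PySem.Chars.split₀.go, hc, Bool.false_eq_true, if_false] at h
      exact pv_goNeNil rest [c] [] (Or.inl (by simp)) h
  · intro hall
    unfold PySem.Chars.split₀
    rw [pv_goAllSpace s hall [] []]
    rfl

theorem pv_strip_eq_nil_iff (s : List Char) :
    PySem.Chars.strip s = [] ↔ ∀ c ∈ s, PySem.Chars.isspace c = true := by
  unfold PySem.Chars.strip PySem.Chars.rstrip PySem.Chars.lstrip
  constructor
  · intro h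
    rw [List.reverse_eq_nil_iff, List.dropWhile_eq_nil_iff] at h
    rw [← List.dropWhile_eq_nil_iff (p := PySem.Chars.isspace)]
    rcases hcons : List.dropWhile PySem.Chars.isspace s with _ | ⟨c, rest⟩
    · rfl
    · exfalso
      have hc : PySem.Chars.isspace c = false := pv_dropWhile_head_false hcons
      have : PySem.Chars.isspace c = true := h c (by simp [hcons])
      simp [hc] at this
  · intro hall
    have : List.dropWhile PySem.Chars.isspace s = [] :=
      List.dropWhile_eq_nil_iff.mpr hall
    simp [this]

theorem pv_split₀_strip (s : List Char) :
    PySem.Chars.split₀ (PySem.Chars.strip s) = PySem.Chars.split₀ s := by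
  unfold PySem.Chars.strip PySem.Chars.split₀
  set u := PySem.Chars.lstrip s with hu
  have hdecomp : u = PySem.Chars.rstrip u ++ (List.takeWhile PySem.Chars.isspace u.reverse).reverse := by
    unfold PySem.Chars.rstrip
    conv_lhs => rw [← List.reverse_reverse u, ← List.takeWhile_append_dropWhile (p := PySem.Chars.isspace) (l := u.reverse)]
    rw [List.reverse_append]
  have hsp : ∀ c ∈ (List.takeWhile PySem.Chars.isspace u.reverse).reverse, PySem.Chars.isspace c = true := by
    intro c hc
    rw [List.mem_reverse] at hc
    exact List.mem_takeWhile_imp hc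
  calc PySem.Chars.split₀.go (PySem.Chars.rstrip u) [] []
      = PySem.Chars.split₀.go (PySem.Chars.rstrip u ++ (List.takeWhile PySem.Chars.isspace u.reverse).reverse) [] [] :=
        (pv_goAppendSpace _ _ hsp [] []).symm
    _ = PySem.Chars.split₀.go u [] [] := by rw [← hdecomp]
    _ = PySem.Chars.split₀.go s [] [] := by
        rw [hu]; unfold PySem.Chars.lstrip; exact pv_goDropWhile s []

theorem pv_dropWhile_of_all_neg {p : Char → Bool} {l : List Char}
    (h : ∀ c ∈ l, p c = false) : List.dropWhile p l = l := by
  cases l with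
  | nil => rfl
  | cons c t => exact List.dropWhile_cons_of_neg (by simp [h c (by simp)])

theorem pv_goWords (s : List Char) :
    ∀ (cur : List Char) (acc : List (List Char)),
      (∀ c ∈ cur, PySem.Chars.isspace c = false) →
      (∀ w ∈ acc, List.dropWhile PySem.Chars.isspace w = w) →
      ∀ w ∈ PySem.Chars.split₀.go s cur acc, List.dropWhile PySem.Chars.isspace w = w := by
  induction s with
  | nil =>
      intro cur acc hcur hacc w hw
      simp only [PySem.Chars.split₀.go] at hw
      by_cases hc : cur.isEmpty
      · simp only [hc, if_true, List.mem_reverse] at hw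
        exact hacc w hw
      · simp only [hc, Bool.false_eq_true, if_false, List.mem_reverse, List.mem_cons] at hw
        rcases hw with hw | hw
        · subst hw
          exact pv_dropWhile_of_all_neg (fun c hcm => hcur c (by simpa using hcm))
        · exact hacc w hw
  | cons c s ih =>
      intro cur acc hcur hacc w hw
      simp only [PySem.Chars.split₀.go] at hw
      by_cases hc : PySem.Chars.isspace c
      · simp only [hc, if_true] at hw
        by_cases hcc : cur.isEmpty
        · simp only [hcc, if_true] at hw
          exact ih [] acc (by simp) hacc w hw
        · simp only [hcc, Bool.false_eq_true, if_false] at hw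
          refine ih [] (cur.reverse :: acc) (by simp) ?_ w hw
          intro v hv
          rcases List.mem_cons.mp hv with hv | hv
          · subst hv
            exact pv_dropWhile_of_all_neg (fun d hdm => hcur d (by simpa using hdm))
          · exact hacc v hv
      · simp only [hc, Bool.false_eq_true, if_false] at hw
        refine ih (c :: cur) acc ?_ hacc w hw
        intro d hd
        rcases List.mem_cons.mp hd with hd | hd
        · subst hd; simpa using hc
        · exact hcur d hd

-- ---- String-level corollaries ----

theorem pv_sstrip_empty_iff (l : String) :
    PySem.Str.strip l = "" ↔ PySem.Str.split₀ l = [] := by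
  unfold PySem.Str.split₀
  rw [List.map_eq_nil_iff]
  constructor
  · intro h
    rw [pv_split₀_eq_nil_iff, ← pv_strip_eq_nil_iff, ← PySem.Str.toList_strip, h]
    rfl
  · intro h
    have : PySem.Chars.strip l.toList = [] := by
      rw [pv_strip_eq_nil_iff, ← pv_split₀_eq_nil_iff]; exact h
    apply String.toList_inj.mp
    rw [PySem.Str.toList_strip, this]
    rfl

theorem pv_ssplit_strip (l : String) :
    PySem.Str.split₀ (PySem.Str.strip l) = PySem.Str.split₀ l := by
  unfold PySem.Str.split₀
  rw [PySem.Str.toList_strip, pv_split₀_strip]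

theorem pv_slstrip_word (l : String) (p : String) (hp : p ∈ PySem.Str.split₀ l) :
    PySem.Str.lstrip p = p := by
  unfold PySem.Str.split₀ at hp
  rw [List.mem_map] at hp
  obtain ⟨w, hw, hpw⟩ := hp
  have hword : List.dropWhile PySem.Chars.isspace w = w := by
    unfold PySem.Chars.split₀ at hw
    exact pv_goWords l.toList [] [] (by simp) (by simp) w hw
  apply String.toList_inj.mp
  rw [PySem.Str.toList_lstrip]
  unfold PySem.Chars.lstrip
  subst hpw
  simpa using hword

-- ---- A's loop reduced to the canonical form ----

theorem pv_loopA_main (ls : List String) :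
    ∀ (i : Nat) (tokens : List String), tokens ≠ [] →
      pvTokALoop ls (i + 1) tokens = tokens ++ (pvContent ls).flatMap pvMark := by
  induction ls with
  | nil => intro i tokens _; simp [pvTokALoop, pvContent]
  | cons line rest ih =>
      intro i tokens htok
      by_cases hblank : PySem.Str.strip line = ""
      · have hsplit : PySem.Str.split₀ line = [] := (pv_sstrip_empty_iff line).mp hblank
        simp only [pvTokALoop, hblank, if_true]
        rw [ih (i + 1) tokens htok]
        simp [pvContent, hsplit]
      · have hsplit : PySem.Str.split₀ line ≠ [] := fun h => hblank ((pv_sstrip_empty_iff line).mpr h)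
        have hparts : PySem.Str.split₀ (PySem.Str.strip line) = PySem.Str.split₀ line :=
          pv_ssplit_strip line
        simp only [pvTokALoop, hblank, if_false, hparts, hsplit, if_neg (by exact hsplit)]
        have hguard : tokens ≠ [] ∧ 0 < i + 1 := ⟨htok, Nat.succ_pos i⟩
        rw [if_pos hguard]
        rcases hcons : PySem.Str.split₀ line with _ | ⟨p, ps⟩
        · exact absurd hcons hsplit
        · have hlp : PySem.Str.lstrip p = p :=
            pv_slstrip_word line p (by rw [hcons]; simp)
          rw [ih (i + 1) (tokens ++ ("\n" ++ PySem.Str.lstrip p) :: ps) (by simp)]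
          simp [pvContent, hcons, pvMark, hlp]

theorem pv_loopA_start (ls : List String) :
    ∀ (i : Nat),
      pvTokALoop ls i [] =
        (match pvContent ls with
         | [] => []
         | head :: rest => head ++ rest.flatMap pvMark) := by
  induction ls with
  | nil => intro i; simp [pvTokALoop, pvContent]
  | cons line rest ih =>
      intro i
      by_cases hblank : PySem.Str.strip line = ""
      · have hsplit : PySem.Str.split₀ line = [] := (pv_sstrip_empty_iff line).mp hblank
        simp only [pvTokALoop, hblank, if_true]
        rw [ih (i + 1)]
        simp [pvContent, hsplit]
      · have hsplit : PySem.Str.split₀ line ≠ [] := fun h => hblank ((pv_sstrip_empty_iff line).mpr h)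
        have hparts : PySem.Str.split₀ (PySem.Str.strip line) = PySem.Str.split₀ line :=
          pv_ssplit_strip line
        simp only [pvTokALoop, hblank, if_false, hparts, if_neg (by exact hsplit)]
        rw [if_neg (by simp)]
        rw [List.nil_append]
        rw [pv_loopA_main rest i (PySem.Str.split₀ line) hsplit]
        simp [pvContent, hsplit]

-- ---- pvSplitNl: splitting at '\n' ----

theorem pv_splitNl_ne_nil (l : List Char) : pvSplitNl l ≠ [] := by
  cases l with
  | nil => simp [pvSplitNl]
  | cons c rest =>
      by_cases hc : c = '\n'
      · simp [pvSplitNl, hc]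
      · simp only [pvSplitNl, hc, if_false]
        cases h : pvSplitNl rest with
        | nil => exact absurd h (pv_splitNl_ne_nil rest)
        | cons p ps => simp [List.modifyHead]

theorem pv_splitNl_nl_free (l : List Char) : ∀ p ∈ pvSplitNl l, '\n' ∉ p := by
  induction l with
  | nil => intro p hp; simp [pvSplitNl] at hp; simp [hp]
  | cons c rest ih =>
      intro p hp
      by_cases hc : c = '\n'
      · simp only [pvSplitNl, hc, if_true, List.mem_cons] at hp
        rcases hp with hp | hp
        · simp [hp]
        · exact ih p hp
      · simp only [pvSplitNl, hc, if_false] at hp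
        cases h : pvSplitNl rest with
        | nil => exact absurd h (pv_splitNl_ne_nil rest)
        | cons q qs =>
            rw [h] at hp
            simp only [List.modifyHead, List.mem_cons] at hp
            rcases hp with hp | hp
            · subst hp
              intro hm
              rcases List.mem_cons.mp hm with hm | hm
              · exact hc hm.symm
              · exact ih q (by rw [h]; simp) hm
            · exact ih p (by rw [h]; simp [hp])

theorem pv_intercalate_splitNl (l : List Char) :
    List.intercalate ['\n'] (pvSplitNl l) = l := by
  induction l with
  | nil => simp [pvSplitNl, List.intercalate]
  | cons c rest ih =>
      by_cases hc : c = '\n'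
      · subst hc
        simp only [pvSplitNl, if_true]
        cases h : pvSplitNl rest with
        | nil => exact absurd h (pv_splitNl_ne_nil rest)
        | cons q qs =>
            rw [h] at ih
            rw [pv_intercalate_cons₂]
            simp [ih]
      · simp only [pvSplitNl, hc, if_false]
        cases h : pvSplitNl rest with
        | nil => exact absurd h (pv_splitNl_ne_nil rest)
        | cons q qs =>
            rw [h] at ih
            cases qs with
            | nil =>
                rw [pv_intercalate_single] at ih
                simp [List.modifyHead, pv_intercalate_single, ih]
            | cons q' qs' =>
                simp only [List.modifyHead]
                rw [pv_intercalate_cons₂] at ih ⊢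
                simp [← ih]

-- pvSplitNl is what PySem's splitOn computes for separator "\n"
theorem pv_splitOn_go_eq (l : List Char) :
    ∀ (fuel : Nat) (cur : List Char) (acc : List (List Char)), l.length < fuel →
      PySem.Chars.splitOn.go ['\n'] fuel l cur acc =
        acc.reverse ++ (pvSplitNl l).modifyHead (fun p => cur.reverse ++ p) := by
  induction l with
  | nil =>
      intro fuel cur acc hf
      cases fuel with
      | zero => omega
      | succ f => simp [PySem.Chars.splitOn.go, pvSplitNl, List.modifyHead]
  | cons c rest ih =>
      intro fuel cur acc hf
      cases fuel with
      | zero => omega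
      | succ f =>
          by_cases hc : c = '\n'
          · subst hc
            have hpre : List.isPrefixOf ['\n'] ('\n' :: rest) = true := by
              simp [List.isPrefixOf]
            simp only [PySem.Chars.splitOn.go, hpre, if_true, List.length_cons,
              List.length_nil, List.drop_succ_cons, List.drop_zero]
            rw [ih f [] (cur.reverse :: acc) (by simpa using Nat.lt_of_succ_lt_succ hf)]
            simp only [pvSplitNl, if_true]
            cases h : pvSplitNl rest with
            | nil => exact absurd h (pv_splitNl_ne_nil rest)
            | cons q qs => simp [List.modifyHead]
          · have hpre : List.isPrefixOf ['\n'] (c :: rest) = false := by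
              simp [List.isPrefixOf]
              intro h; exact absurd h.symm hc
            simp only [PySem.Chars.splitOn.go, hpre, Bool.false_eq_true, if_false]
            rw [ih f (c :: cur) acc (by simpa using Nat.lt_of_succ_lt_succ hf)]
            simp only [pvSplitNl, hc, if_false]
            cases h : pvSplitNl rest with
            | nil => exact absurd h (pv_splitNl_ne_nil rest)
            | cons q qs => simp [List.modifyHead]

theorem pv_splitOn_eq_splitNl (l : List Char) :
    PySem.Chars.splitOn l ['\n'] = pvSplitNl l := by
  unfold PySem.Chars.splitOn
  rw [pv_splitOn_go_eq l (l.length + 1) [] [] (Nat.lt_succ_self _)]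
  cases h : pvSplitNl l with
  | nil => exact absurd h (pv_splitNl_ne_nil l)
  | cons q qs => simp [List.modifyHead]

-- ---- split₀.go: the accumulator appends ----

theorem pv_go_acc (s : List Char) :
    ∀ (cur : List Char) (acc : List (List Char)),
      PySem.Chars.split₀.go s cur acc = acc.reverse ++ PySem.Chars.split₀.go s cur [] := by
  induction s with
  | nil =>
      intro cur acc
      by_cases hcur : cur.isEmpty
      · simp [PySem.Chars.split₀.go, hcur]
      · simp [PySem.Chars.split₀.go, hcur]
  | cons c s ih =>
      intro cur acc
      by_cases hc : PySem.Chars.isspace c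
      · by_cases hcur : cur.isEmpty
        · simp only [PySem.Chars.split₀.go, hc, if_true, hcur]
          exact ih [] acc
        · simp only [PySem.Chars.split₀.go, hc, if_true, hcur, Bool.false_eq_true, if_false]
          rw [ih [] (cur.reverse :: acc), ih [] [cur.reverse]]
          simp
      · simp only [PySem.Chars.split₀.go, hc, Bool.false_eq_true, if_false]
        exact ih (c :: cur) acc

-- ---- B's scan reduced to the canonical form ----

theorem pv_scan_eof (cs : List Char) (hnl : '\n' ∉ cs) :
    ∀ (tokens : List String) (cur : List Char) (pending : Bool),
      pvScanB cs tokens cur pending =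
        tokens ++ pvMarkIf (pending && !tokens.isEmpty)
          ((PySem.Chars.split₀.go cs cur.reverse []).map String.ofList) := by
  induction cs with
  | nil =>
      intro tokens cur pending
      by_cases hcur : cur.isEmpty
      · have : cur = [] := List.isEmpty_iff.mp hcur
        subst this
        simp [pvScanB, PySem.Chars.split₀.go, pvMarkIf_nil]
      · have hr : cur.reverse.isEmpty = false := by
          simp only [List.isEmpty_reverse]; simpa using hcur
        simp only [pvScanB, hcur, Bool.false_eq_true, if_false,
          PySem.Chars.split₀.go, hr, List.reverse_reverse, List.reverse_singleton]
        rw [List.map_cons, List.map_nil, pvMarkIf_cons]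
  | cons c cs ih =>
      intro tokens cur pending
      have hcnl : c ≠ '\n' := fun h => hnl (by simp [h])
      have hnl' : '\n' ∉ cs := fun h => hnl (by simp [h])
      by_cases hc : PySem.Chars.isspace c
      · by_cases hcur : cur.isEmpty
        · have hcur' : cur = [] := List.isEmpty_iff.mp hcur
          subst hcur'
          simp only [pvScanB, hc, if_true, List.isEmpty_nil, hcnl, if_false]
          rw [ih hnl' tokens [] pending]
          simp [PySem.Chars.split₀.go, hc]
        · have hr : cur.reverse.isEmpty = false := by
            simp only [List.isEmpty_reverse]; simpa using hcur
          simp only [pvScanB, hc, if_true, hcur, Bool.false_eq_true, if_false, hcnl]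
          rw [ih hnl' (tokens ++ [if pending && !tokens.isEmpty then "\n" ++ String.ofList cur else String.ofList cur]) [] false]
          simp only [PySem.Chars.split₀.go, hc, if_true, hr, Bool.false_eq_true, if_false]
          simp only [List.reverse_reverse]
          rw [pv_go_acc cs [] [cur]]
          simp only [List.reverse_cons, List.reverse_nil, List.nil_append, List.reverse_reverse,
            List.map_append, List.map_cons, List.map_nil]
          simp only [List.singleton_append]
          rw [pvMarkIf_cons]
          simp [pvMarkIf, Bool.false_and]
      · simp only [pvScanB, hc, Bool.false_eq_true, if_false]
        rw [ih hnl' tokens (cur ++ [c]) pending]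
        simp [PySem.Chars.split₀.go, hc]

theorem pv_scan_line (cs : List Char) (hnl : '\n' ∉ cs) :
    ∀ (rest : List Char) (tokens : List String) (cur : List Char) (pending : Bool),
      pvScanB (cs ++ '\n' :: rest) tokens cur pending =
        pvScanB rest
          (tokens ++ pvMarkIf (pending && !tokens.isEmpty)
            ((PySem.Chars.split₀.go cs cur.reverse []).map String.ofList))
          [] true := by
  induction cs with
  | nil =>
      intro rest tokens cur pending
      have hsp : PySem.Chars.isspace '\n' = true := by decide
      by_cases hcur : cur.isEmpty
      · have : cur = [] := List.isEmpty_iff.mp hcur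
        subst this
        simp [pvScanB, hsp, PySem.Chars.split₀.go, pvMarkIf_nil]
      · have hr : cur.reverse.isEmpty = false := by
          simp only [List.isEmpty_reverse]; simpa using hcur
        simp only [List.nil_append, pvScanB, hsp, if_true, hcur, Bool.false_eq_true, if_false]
        simp only [PySem.Chars.split₀.go, hr, Bool.false_eq_true, if_false, List.reverse_reverse,
          List.reverse_singleton]
        rw [List.map_cons, List.map_nil, pvMarkIf_cons]
  | cons c cs ih =>
      intro rest tokens cur pending
      have hcnl : c ≠ '\n' := fun h => hnl (by simp [h])
      have hnl' : '\n' ∉ cs := fun h => hnl (by simp [h])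
      by_cases hc : PySem.Chars.isspace c
      · by_cases hcur : cur.isEmpty
        · have hcur' : cur = [] := List.isEmpty_iff.mp hcur
          subst hcur'
          simp only [List.cons_append, pvScanB, hc, if_true, List.isEmpty_nil, hcnl, if_false]
          rw [ih hnl' rest tokens [] pending]
          simp [PySem.Chars.split₀.go, hc]
        · have hr : cur.reverse.isEmpty = false := by
            simp only [List.isEmpty_reverse]; simpa using hcur
          simp only [List.cons_append, pvScanB, hc, if_true, hcur, Bool.false_eq_true, if_false, hcnl]
          rw [ih hnl' rest (tokens ++ [if pending && !tokens.isEmpty then "\n" ++ String.ofList cur else String.ofList cur]) [] false]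
          simp only [PySem.Chars.split₀.go, hc, if_true, hr, Bool.false_eq_true, if_false]
          simp only [List.reverse_reverse]
          rw [pv_go_acc cs [] [cur]]
          simp only [List.reverse_cons, List.reverse_nil, List.nil_append, List.reverse_reverse,
            List.map_append, List.map_cons, List.map_nil]
          simp only [List.singleton_append]
          rw [pvMarkIf_cons]
          simp [pvMarkIf, Bool.false_and]
      · simp only [List.cons_append, pvScanB, hc, Bool.false_eq_true, if_false]
        rw [ih hnl' rest tokens (cur ++ [c]) pending]
        simp [PySem.Chars.split₀.go, hc]

theorem pv_scanB_main (pieces : List (List Char)) :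
    (∀ p ∈ pieces, '\n' ∉ p) → ∀ (tokens : List String), tokens ≠ [] →
      pvScanB (List.intercalate ['\n'] pieces) tokens [] true =
        tokens ++ (pvContentC pieces).flatMap pvMark := by
  induction pieces with
  | nil => intro _ tokens _; simp [List.intercalate, pvScanB, pvContentC]
  | cons p rest ih =>
      intro hfree tokens htok
      have hpfree : '\n' ∉ p := hfree p (by simp)
      have hrfree : ∀ q ∈ rest, '\n' ∉ q := fun q hq => hfree q (by simp [hq])
      have hne : tokens.isEmpty = false := by simp [htok]
      have hwords : (PySem.Chars.split₀.go p (List.reverse []) []).map String.ofList = pvWordsC p := by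
        simp [pvWordsC, PySem.Chars.split₀]
      cases rest with
      | nil =>
          rw [pv_intercalate_single]
          rw [pv_scan_eof p hpfree tokens [] true, hwords]
          simp only [hne, Bool.not_false, Bool.and_true, Bool.true_and, pvMarkIf, if_true]
          cases hw : pvWordsC p with
          | nil => simp [pvContentC, hw, pvMark]
          | cons w ws => simp [pvContentC, hw, pvMark]
      | cons q qs =>
          rw [pv_intercalate_cons₂]
          rw [pv_scan_line p hpfree _ tokens [] true, hwords]
          simp only [hne, Bool.not_false, Bool.and_true, Bool.true_and, pvMarkIf, if_true]
          rw [ih hrfree (tokens ++ pvMark (pvWordsC p)) (by simp [htok])]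
          cases hw : pvWordsC p with
          | nil => simp [pvContentC, hw, pvMark]
          | cons w ws => simp [pvContentC, hw, pvMark]

theorem pv_scanB_start (pieces : List (List Char)) :
    (∀ p ∈ pieces, '\n' ∉ p) → ∀ (pending : Bool),
      pvScanB (List.intercalate ['\n'] pieces) [] [] pending =
        (match pvContentC pieces with
         | [] => []
         | head :: rest => head ++ rest.flatMap pvMark) := by
  induction pieces with
  | nil => intro _ pending; simp [List.intercalate, pvScanB, pvContentC]
  | cons p rest ih =>
      intro hfree pending
      have hpfree : '\n' ∉ p := hfree p (by simp)
      have hrfree : ∀ q ∈ rest, '\n' ∉ q := fun q hq => hfree q (by simp [hq])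
      have hwords : (PySem.Chars.split₀.go p (List.reverse []) []).map String.ofList = pvWordsC p := by
        simp [pvWordsC, PySem.Chars.split₀]
      cases rest with
      | nil =>
          rw [pv_intercalate_single]
          rw [pv_scan_eof p hpfree [] [] pending, hwords]
          simp only [List.isEmpty_nil, Bool.not_true, Bool.and_false, pvMarkIf,
            Bool.false_eq_true, if_false, List.nil_append]
          cases hw : pvWordsC p with
          | nil => simp [pvContentC, hw]
          | cons w ws => simp [pvContentC, hw]
      | cons q qs =>
          rw [pv_intercalate_cons₂]
          rw [pv_scan_line p hpfree _ [] [] pending, hwords]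
          simp only [List.isEmpty_nil, Bool.not_true, Bool.and_false, pvMarkIf,
            Bool.false_eq_true, if_false, List.nil_append]
          cases hw : pvWordsC p with
          | nil =>
              rw [ih hrfree true]
              simp [pvContentC, hw]
          | cons w ws =>
              rw [pv_scanB_main (q :: qs) hrfree (w :: ws) (by simp)]
              simp [pvContentC, hw]

-- ===== VERDICT (by name: the statement is the Claim_ definition above) =====
set_option maxHeartbeats 1000000 in
theorem tokenize_user_text_for_alignment_py_spec : Claim_equal_tokenize_user_text_for_alignment_py := by
  intro raw_text _
  unfold Spec_tokenize_user_text_for_alignment_py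
  unfold tokenize_user_text_for_alignment_py tokenize_user_text_for_alignment_py_alt
  simp only []
  set t := PySem.Str.replace (PySem.Str.replace (raw_text.getD "") "\r\n" "\n") "\r" "\n" with ht
  have hsep : ("\n" : String).toList = ['\n'] := rfl
  have hsplit : (PySem.Str.split? t "\n").getD [] = (pvSplitNl t.toList).map String.ofList := by
    unfold PySem.Str.split? PySem.Chars.split?
    rw [hsep]
    simp [pv_splitOn_eq_splitNl]
  rw [hsplit, pv_loopA_start]
  have hcontent : pvContent ((pvSplitNl t.toList).map String.ofList) = pvContentC (pvSplitNl t.toList) := by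
    unfold pvContent pvContentC
    rw [List.map_map]
    have hf : (PySem.Str.split₀ ∘ String.ofList) = pvWordsC := by
      funext p
      simp [pvWordsC, PySem.Str.split₀, Function.comp]
    rw [hf]
  rw [hcontent]
  conv_rhs => rw [show t.toList = List.intercalate ['\n'] (pvSplitNl t.toList) from (pv_intercalate_splitNl t.toList).symm]
  rw [pv_scanB_start (pvSplitNl t.toList) (pv_splitNl_nl_free t.toList) false]
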